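-- pv_equiv track=rewrite | github.com/Vale-source/Programacion-1 | Funciones.py | interspace
-- ===== SOURCE A (Python) =====
-- def interspace(word):
--     word_spaced = ""
--     """ Lo pase a ASCII porque segun el ejemplo del ejercicio, se agrega un espacio delante de las letras y
--         caracteres como la coma, pero el caracter del espacio, no se le agrega nada """
--     for i in word:
--         i = ord(i)
--         if i == 32:
--             i = chr(i)
--             word_spaced += i
--         else:
--             i = chr(i)
--             word_spaced += i+" "
--     return word_spaced
-- ===== SOURCE B (Python) =====
-- import re
--
-- def interspace(word):
--     return re.sub(r'([^ ])', r'\1 ', word)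
-- ===== Notes on version B (the rewrite author's own statement) =====
-- stated objective: idiomatic
-- what changed: Replaced the explicit ord/chr character loop with string concatenation by a single regex substitution appending a space after every non-space character.
import Mathlib
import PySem

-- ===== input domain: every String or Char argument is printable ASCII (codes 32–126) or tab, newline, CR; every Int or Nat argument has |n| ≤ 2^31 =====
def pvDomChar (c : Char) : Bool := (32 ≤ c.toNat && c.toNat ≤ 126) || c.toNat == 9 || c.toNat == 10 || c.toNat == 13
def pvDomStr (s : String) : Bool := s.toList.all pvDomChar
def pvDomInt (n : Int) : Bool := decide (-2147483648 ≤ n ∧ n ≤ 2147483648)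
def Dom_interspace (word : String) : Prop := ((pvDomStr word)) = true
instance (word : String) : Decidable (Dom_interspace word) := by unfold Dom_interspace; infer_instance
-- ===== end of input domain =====

-- B replaces A's explicit ord/chr loop with one regex substitution appending a space after every non-space char (idiomatic).

-- ===== PORT A =====
-- A: loop over the chars, appending c (if ord c == 32) or c ++ " " to the accumulator.
def interspace (word : String) : String :=
  word.toList.foldl
    (fun word_spaced c =>
      if c.toNat = 32 then word_spaced ++ String.ofList [c]
      else word_spaced ++ String.ofList [c] ++ " ")
    ""

-- ===== PORT B =====
-- B: re.sub(r'([^ ])', r'\1 ', word) — the regex replaces each char not equal to ' ' by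
-- itself followed by a space; ported as exactly that per-char expansion (exact semantics
-- of this regex substitution).
def interspace_alt (word : String) : String :=
  String.ofList (word.toList.flatMap (fun c => if c = ' ' then [c] else [c, ' ']))

-- ===== PRECONDITION & SPEC =====
def Spec_interspace (word : String) (out : String) : Prop := out = interspace_alt word
instance (word : String) (out : String) : Decidable (Spec_interspace word out) := by unfold Spec_interspace; infer_instance

-- ===== CLAIM (what is proved, stated in full; the proofs are below) =====
def Claim_equal_interspace : Prop := ∀ (word : String), Dom_interspace word → Spec_interspace word (interspace word)

-- ===== LEMMAS AND PROOFS =====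

theorem ofList_append_ofList (xs ys : List Char) :
    String.ofList xs ++ String.ofList ys = String.ofList (xs ++ ys) := by simp

theorem space_eq : (" " : String) = String.ofList [' '] := by decide

theorem interspace_foldl_acc (l : List Char) (acc : String) :
    l.foldl
      (fun word_spaced c =>
        if c.toNat = 32 then word_spaced ++ String.ofList [c]
        else word_spaced ++ String.ofList [c] ++ " ")
      acc
    = acc ++ String.ofList (l.flatMap (fun c => if c = ' ' then [c] else [c, ' '])) := by
  induction l generalizing acc with
  | nil => simp
  | cons c t ih =>
    have hc : (c.toNat = 32) ↔ (c = ' ') := by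
      constructor
      · intro h
        have h2 := Char.ofNat_toNat c
        rw [h] at h2
        exact h2.symm ▸ (by decide : Char.ofNat 32 = ' ')
      · intro h; simp [h]
    by_cases h : c = ' '
    · simp only [List.foldl, List.flatMap_cons, if_pos h, if_pos (hc.mpr h), ih]
      rw [String.append_assoc, ofList_append_ofList]
    · have h32 : ¬ c.toNat = 32 := fun hh => h (hc.mp hh)
      simp only [List.foldl, List.flatMap_cons, if_neg h, if_neg h32, ih]
      rw [space_eq, String.append_assoc, String.append_assoc, ofList_append_ofList,
          ofList_append_ofList]
      rfl

-- ===== VERDICT (by name: the statement is the Claim_ definition above) =====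
theorem interspace_spec : Claim_equal_interspace := by
  intro word _
  unfold Spec_interspace interspace interspace_alt
  simpa using interspace_foldl_acc word.toList ""
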